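-- pv_equiv track=rewrite | github.com/DieFleitas/facultad | 2025/exactas/algo1/src/2mitad/ejercicios/7/ej2.py | ceros_en_posiciones_pares
-- ===== SOURCE A (Python) =====
-- def ceros_en_posiciones_pares(s: list[int]) -> list[int]:
--     """Devuelve nueva lista con ceros en posiciones pares."""
--     res: list[int] = []
--     i = 0
--     while i < len(s):
--         if i % 2 == 0:
--             res.append(0)
--         else:
--             res.append(s[i])
--         i += 1
--     return res
-- ===== SOURCE B (Python) =====
-- def ceros_en_posiciones_pares(s: list[int]) -> list[int]:
--     """Devuelve nueva lista con ceros en posiciones pares."""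
--     res = list(s)
--     res[::2] = [0] * len(res[::2])
--     return res
-- ===== Notes on version B (the rewrite author's own statement) =====
-- stated objective: faster
-- what changed: Replaces the index-counting while loop with a per-element parity branch by a full copy followed by one bulk slice assignment that overwrites the even stride with zeros.
import Mathlib
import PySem

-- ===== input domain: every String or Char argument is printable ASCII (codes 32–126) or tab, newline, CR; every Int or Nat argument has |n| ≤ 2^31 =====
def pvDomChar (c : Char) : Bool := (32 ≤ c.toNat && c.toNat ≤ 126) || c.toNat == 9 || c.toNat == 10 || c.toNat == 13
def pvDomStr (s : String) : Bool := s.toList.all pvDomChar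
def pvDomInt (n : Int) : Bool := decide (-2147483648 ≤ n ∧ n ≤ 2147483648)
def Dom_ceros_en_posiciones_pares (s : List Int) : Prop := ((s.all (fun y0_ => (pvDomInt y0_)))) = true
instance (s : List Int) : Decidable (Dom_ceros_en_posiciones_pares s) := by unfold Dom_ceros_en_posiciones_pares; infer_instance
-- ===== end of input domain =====

-- B copies the list and overwrites the even stride in one bulk slice assignment (idiomatic; same O(n) cost); return-value equivalence only, neither version mutates its argument.

-- ===== PORT A =====
-- while loop over index i, appending 0 at even i and s[i] at odd i
def cerosGo (s : List Int) (i : Nat) (res : List Int) : List Int :=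
  if _h : i < s.length then
    cerosGo s (i + 1) (res ++ [if i % 2 == 0 then 0 else s.getD i 0])
  else res
termination_by s.length - i

def ceros_en_posiciones_pares (s : List Int) : List Int :=
  cerosGo s 0 []

-- ===== PORT B =====
-- slice assignment res[::2] = zs: replace every second element of res by the next element of zs
def assignEvery2 : List Int → List Int → List Int
  | res, [] => res
  | [], _ => []
  | [_], z :: _ => [z]
  | _ :: b :: rest, z :: zs => z :: b :: assignEvery2 rest zs

def ceros_en_posiciones_pares_alt (s : List Int) : List Int :=
  -- res = list(s); res[::2] = [0] * len(res[::2]); len(res[::2]) = (len(s)+1)/2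
  assignEvery2 s (List.replicate ((s.length + 1) / 2) 0)

-- ===== PRECONDITION & SPEC =====
def Spec_ceros_en_posiciones_pares (s : List Int) (out : List Int) : Prop := out = ceros_en_posiciones_pares_alt s
instance (s : List Int) (out : List Int) : Decidable (Spec_ceros_en_posiciones_pares s out) := by unfold Spec_ceros_en_posiciones_pares; infer_instance

-- ===== CLAIM (what is proved, stated in full; the proofs are below) =====
def Claim_equal_ceros_en_posiciones_pares : Prop := ∀ (s : List Int), Dom_ceros_en_posiciones_pares s → Spec_ceros_en_posiciones_pares s (ceros_en_posiciones_pares s)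

-- ===== LEMMAS AND PROOFS =====

-- reference function: element-wise with an index carrying only parity information
def pvF : List Int → Nat → List Int
  | [], _ => []
  | x :: xs, i => (if i % 2 == 0 then 0 else x) :: pvF xs (i + 1)

theorem cerosGo_eq_pvF (s : List Int) : ∀ (n i : Nat) (res : List Int),
    s.length - i = n → cerosGo s i res = res ++ pvF (s.drop i) i := by
  intro n
  induction n with
  | zero =>
    intro i res h
    have hle : s.length ≤ i := by omega
    rw [cerosGo]
    simp [List.drop_eq_nil_of_le hle, Nat.not_lt.mpr hle, pvF]
  | succ n ih =>
    intro i res h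
    have hlt : i < s.length := by omega
    rw [cerosGo]
    simp only [hlt, dif_pos]
    rw [ih (i + 1) _ (by omega)]
    have hdrop : s.drop i = s[i]! :: s.drop (i + 1) := by
      rw [List.getElem!_eq_getElem?_getD, List.getElem?_eq_getElem hlt]
      exact List.drop_eq_getElem_cons hlt
    rw [hdrop, pvF]
    simp [List.getD, List.getElem!_eq_getElem?_getD]

theorem pvF_parity (l : List Int) : ∀ i, pvF l (i + 2) = pvF l i := by
  induction l with
  | nil => intro i; simp [pvF]
  | cons x xs ih =>
    intro i
    simp only [pvF]
    have hm : (i + 2) % 2 = i % 2 := by omega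
    rw [hm, show i + 2 + 1 = i + 1 + 2 from by omega, ih (i + 1)]

theorem pvF_eq_alt : (s : List Int) → pvF s 0 = ceros_en_posiciones_pares_alt s
  | [] => by simp [pvF, ceros_en_posiciones_pares_alt, assignEvery2]
  | [_] => by simp [pvF, ceros_en_posiciones_pares_alt, assignEvery2]
  | a :: b :: rest => by
    have ih := pvF_eq_alt rest
    unfold ceros_en_posiciones_pares_alt at ih ⊢
    have hlen : ((a :: b :: rest).length + 1) / 2 = ((rest.length + 1) / 2) + 1 := by
      simp; omega
    rw [hlen, List.replicate_succ]
    simp only [pvF, assignEvery2]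
    rw [show (0 + 1 + 1 : Nat) = 2 from rfl, pvF_parity rest 0, ih]
    simp

-- ===== VERDICT (by name: the statement is the Claim_ definition above) =====
theorem ceros_en_posiciones_pares_spec : Claim_equal_ceros_en_posiciones_pares := by
  intro s _
  unfold Spec_ceros_en_posiciones_pares ceros_en_posiciones_pares
  rw [cerosGo_eq_pvF s (s.length - 0) 0 [] rfl]
  simpa using pvF_eq_alt s
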